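-- pv_equiv track=rewrite | github.com/usajosefernan-cmd/mvp1.2 | handler.py | _filter_safe_sections
-- ===== SOURCE A (Python) =====
-- def _filter_safe_sections(master_prompt: str) -> str:
--     """
--     Filtro de secciones seguras (Protocolo v3).
--     Elimina secciones que causan movimiento en la imagen.
--     """
--     SAFE_MARKERS = [
--         "RESTORATION IDENTITY", "OPTICAL CHARACTER", "COLOR",
--         "SUBJECT APPEARANCE", "SURFACE & MATERIAL CATALOG",
--         "DISAMBIGUATION", "REPAIR", "CONSTRAINTS", "NEGATIVE PROMPT",
--         "EXACT TEXT"
--     ]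
--     DANGEROUS_MARKERS = [
--         "STRUCTURAL FIDELITY", "SCENE MAP", "SUBJECT CATALOG",
--         "DYNAMIC STATES", "GEOMETRY", "POSES", "COMPOSITION",
--         "SPATIAL RELATIONSHIPS"
--     ]
--
--     lines = master_prompt.split("\n")
--     safe_lines = []
--     current_safe = True
--
--     for line in lines:
--         trimmed = line.strip()
--         if trimmed.startswith("##"):
--             upper = trimmed.upper()
--             if any(m in upper for m in DANGEROUS_MARKERS):
--                 current_safe = False
--             elif any(m in upper for m in SAFE_MARKERS):
--                 current_safe = True
--         if current_safe:
--             safe_lines.append(line)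
--
--     result = "\n".join(safe_lines).strip()
--     # Si el filtro eliminó demasiado, devolver original
--     return result if len(result) >= 200 else master_prompt
-- ===== SOURCE B (Python) =====
-- def _filter_safe_sections(master_prompt: str) -> str:
--     """Two-pass re-implementation: group lines into contiguous sections at
--     '##' headers, classify each section once, then flatten the safe ones."""
--     SAFE_MARKERS = [
--         "RESTORATION IDENTITY", "OPTICAL CHARACTER", "COLOR",
--         "SUBJECT APPEARANCE", "SURFACE & MATERIAL CATALOG",
--         "DISAMBIGUATION", "REPAIR", "CONSTRAINTS", "NEGATIVE PROMPT",
--         "EXACT TEXT"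
--     ]
--     DANGEROUS_MARKERS = [
--         "STRUCTURAL FIDELITY", "SCENE MAP", "SUBJECT CATALOG",
--         "DYNAMIC STATES", "GEOMETRY", "POSES", "COMPOSITION",
--         "SPATIAL RELATIONSHIPS"
--     ]
--
--     # Pass 1: group into sections; a new section starts at each '##' header.
--     sections = []
--     for line in master_prompt.split("\n"):
--         if line.strip().startswith("##") or not sections:
--             sections.append([line])
--         else:
--             sections[-1].append(line)
--
--     # Pass 2: classify each section by its first line, inheriting the
--     # previous section's flag when the header names no marker.
--     kept = []
--     flag = True
--     for sec in sections:
--         head = sec[0].strip()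
--         if head.startswith("##"):
--             upper = head.upper()
--             if any(m in upper for m in DANGEROUS_MARKERS):
--                 flag = False
--             elif any(m in upper for m in SAFE_MARKERS):
--                 flag = True
--         if flag:
--             kept.extend(sec)
--
--     result = "\n".join(kept).strip()
--     return result if len(result) >= 200 else master_prompt
-- ===== Notes on version B (the rewrite author's own statement) =====
-- stated objective: alternative
-- what changed: Replaces A's single pass carrying a running safe-flag per line with two passes: first group the lines into contiguous sections, each starting at a line whose stripped form begins with the double-hash header marker, then classify each section once by its header line (inheriting the previous section's flag) and flatten the safe sections.
import Mathlib
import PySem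

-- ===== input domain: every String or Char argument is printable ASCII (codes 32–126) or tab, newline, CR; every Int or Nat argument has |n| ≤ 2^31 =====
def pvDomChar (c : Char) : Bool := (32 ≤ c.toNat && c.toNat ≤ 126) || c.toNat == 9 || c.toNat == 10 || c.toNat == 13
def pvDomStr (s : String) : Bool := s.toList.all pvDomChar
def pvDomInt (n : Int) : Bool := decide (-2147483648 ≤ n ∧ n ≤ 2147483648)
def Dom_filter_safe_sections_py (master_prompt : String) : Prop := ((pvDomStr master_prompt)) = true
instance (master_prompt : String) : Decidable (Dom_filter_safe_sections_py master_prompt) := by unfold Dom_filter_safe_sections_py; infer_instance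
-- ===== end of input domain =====

-- B replaces A's one pass with a running per-line flag by two passes (group lines into
-- contiguous header-started sections, classify each section once, flatten the safe ones):
-- an alternative decomposition, same cost.

def pvSafeMarkers : List String :=
  ["RESTORATION IDENTITY", "OPTICAL CHARACTER", "COLOR",
   "SUBJECT APPEARANCE", "SURFACE & MATERIAL CATALOG",
   "DISAMBIGUATION", "REPAIR", "CONSTRAINTS", "NEGATIVE PROMPT",
   "EXACT TEXT"]

def pvDangerMarkers : List String :=
  ["STRUCTURAL FIDELITY", "SCENE MAP", "SUBJECT CATALOG",
   "DYNAMIC STATES", "GEOMETRY", "POSES", "COMPOSITION",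
   "SPATIAL RELATIONSHIPS"]

-- ===== PORT A =====
-- loop body of A's single for-loop (state: (safe_lines, current_safe))
def pvLoopA (st : List String × Bool) (line : String) : List String × Bool :=
  let trimmed := PySem.Str.strip line
  let st :=
    if PySem.Str.startswith trimmed "##" then
      let upper := PySem.Str.upper trimmed
      if pvDangerMarkers.any (fun m => PySem.Str.isIn m upper) then (st.1, false)
      else if pvSafeMarkers.any (fun m => PySem.Str.isIn m upper) then (st.1, true)
      else st
    else st
  if st.2 then (st.1 ++ [line], st.2) else st

def filter_safe_sections_py (master_prompt : String) : String :=
  -- split? is none only for sep = ""; the separator here is the literal "\n"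
  let lines := (PySem.Str.split? master_prompt "\n").getD []
  let st := lines.foldl pvLoopA ([], true)
  let result := PySem.Str.strip (PySem.Str.join "\n" st.1)
  if 200 ≤ PySem.Str.len result then result else master_prompt

-- ===== PORT B =====
-- pass 1 body: start a new section at each '##' header, else append to the last section
def pvGroupStep (secs : List (List String)) (line : String) : List (List String) :=
  if PySem.Str.startswith (PySem.Str.strip line) "##" || secs.isEmpty then
    secs ++ [[line]]
  else
    secs.dropLast ++ [(secs.getLast?.getD []) ++ [line]]

-- pass 2 body: classify a section by its first line (sections are never empty, so
-- headD "" is exactly Python's sec[0]), inheriting the previous flag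
def pvSecStep (st : List String × Bool) (sec : List String) : List String × Bool :=
  let head := PySem.Str.strip (sec.headD "")
  let flag :=
    if PySem.Str.startswith head "##" then
      let upper := PySem.Str.upper head
      if pvDangerMarkers.any (fun m => PySem.Str.isIn m upper) then false
      else if pvSafeMarkers.any (fun m => PySem.Str.isIn m upper) then true
      else st.2
    else st.2
  if flag then (st.1 ++ sec, flag) else (st.1, flag)

def filter_safe_sections_py_alt (master_prompt : String) : String :=
  -- split? is none only for sep = ""; the separator here is the literal "\n"
  let lines := (PySem.Str.split? master_prompt "\n").getD []
  let sections := lines.foldl pvGroupStep []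
  let st := sections.foldl pvSecStep ([], true)
  let result := PySem.Str.strip (PySem.Str.join "\n" st.1)
  if 200 ≤ PySem.Str.len result then result else master_prompt

-- ===== PRECONDITION & SPEC =====
def Spec_filter_safe_sections_py (master_prompt : String) (out : String) : Prop := out = filter_safe_sections_py_alt master_prompt
instance (master_prompt : String) (out : String) : Decidable (Spec_filter_safe_sections_py master_prompt out) := by unfold Spec_filter_safe_sections_py; infer_instance

-- ===== CLAIM (what is proved, stated in full; the proofs are below) =====
def Claim_equal_filter_safe_sections_py : Prop := ∀ (master_prompt : String), Dom_filter_safe_sections_py master_prompt → Spec_filter_safe_sections_py master_prompt (filter_safe_sections_py master_prompt)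

-- ===== LEMMAS AND PROOFS =====

-- abstract line predicate and flag-update function shared by the two analyses
def pvHdr (line : String) : Bool := PySem.Str.startswith (PySem.Str.strip line) "##"

def pvCls (line : String) (f : Bool) : Bool :=
  if pvHdr line then
    let upper := PySem.Str.upper (PySem.Str.strip line)
    if pvDangerMarkers.any (fun m => PySem.Str.isIn m upper) then false
    else if pvSafeMarkers.any (fun m => PySem.Str.isIn m upper) then true
    else f
  else f

def pvStepA (st : List String × Bool) (line : String) : List String × Bool :=
  let f := pvCls line st.2
  if f then (st.1 ++ [line], f) else (st.1, f)

lemma pvLoopA_eq_stepA : pvLoopA = pvStepA := by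
  funext st line
  obtain ⟨acc, f⟩ := st
  simp only [pvLoopA, pvStepA, pvCls, pvHdr]
  split_ifs <;> simp_all

-- recursive characterisation of pass 1: sections split at headers
def pvGroupRec : List String → List (List String)
  | [] => []
  | l :: ls =>
      (l :: ls.takeWhile (fun x => !pvHdr x)) :: pvGroupRec (ls.dropWhile (fun x => !pvHdr x))
termination_by ls => ls.length
decreasing_by
  have := List.length_dropWhile_le (fun x => !pvHdr x) ls
  simp
  omega

lemma pvGroupRec_nil : pvGroupRec [] = [] := by
  rw [pvGroupRec.eq_def]

lemma pvGroupRec_cons (l : String) (ls : List String) :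
    pvGroupRec (l :: ls)
      = (l :: ls.takeWhile (fun x => !pvHdr x)) :: pvGroupRec (ls.dropWhile (fun x => !pvHdr x)) := by
  rw [pvGroupRec.eq_def]

lemma pvGroupStep_fold (lines : List String) :
    ∀ (secs : List (List String)) (c : List String),
      List.foldl pvGroupStep (secs ++ [c]) lines
        = secs ++ [c ++ lines.takeWhile (fun x => !pvHdr x)]
            ++ pvGroupRec (lines.dropWhile (fun x => !pvHdr x)) := by
  induction lines with
  | nil => intro secs c; simp [pvGroupRec_nil]
  | cons l ls ih =>
      intro secs c
      by_cases h : pvHdr l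
      · have hstep : pvGroupStep (secs ++ [c]) l = (secs ++ [c]) ++ [[l]] := by
          simp [pvGroupStep, pvHdr] at h ⊢
          simp [h]
        rw [List.foldl_cons, hstep, ih (secs ++ [c]) [l]]
        simp [h, pvGroupRec_cons]
      · have hstep : pvGroupStep (secs ++ [c]) l = secs ++ [c ++ [l]] := by
          simp [pvGroupStep, pvHdr] at h ⊢
          simp [h]
        rw [List.foldl_cons, hstep, ih secs (c ++ [l])]
        simp [h]

lemma pvGroup_eq_rec (lines : List String) :
    List.foldl pvGroupStep [] lines = pvGroupRec lines := by
  cases lines with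
  | nil => simp [pvGroupRec_nil]
  | cons l ls =>
      have hstep : pvGroupStep [] l = [] ++ [[l]] := by
        simp [pvGroupStep]
      rw [List.foldl_cons, hstep, pvGroupStep_fold ls [] [l], pvGroupRec_cons]
      simp

lemma pvStepA_nonhdr_fold (t : List String) :
    ∀ (st : List String × Bool), (∀ x ∈ t, pvHdr x = false) →
      List.foldl pvStepA st t = (st.1 ++ (if st.2 then t else []), st.2) := by
  induction t with
  | nil => intro st _; simp
  | cons x xs ih =>
      intro st h
      have hx : pvHdr x = false := h x (by simp)
      have hxs : ∀ y ∈ xs, pvHdr y = false := fun y hy => h y (by simp [hy])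
      have hcls : pvCls x st.2 = st.2 := by simp [pvCls, hx]
      simp only [List.foldl_cons, pvStepA, hcls]
      cases hf : st.2 with
      | false => simp [ih _ hxs]
      | true => simp [ih _ hxs]

lemma pvSecStep_eq_fold (l : String) (t : List String) (st : List String × Bool)
    (h : ∀ x ∈ t, pvHdr x = false) :
    pvSecStep st (l :: t) = List.foldl pvStepA st (l :: t) := by
  rw [List.foldl_cons, pvStepA_nonhdr_fold t (pvStepA st l) h]
  show (if pvCls l st.2 then (st.1 ++ (l :: t), pvCls l st.2) else (st.1, pvCls l st.2)) = _
  cases hc : pvCls l st.2 <;> simp [pvStepA, hc]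

lemma pvMainFold (lines : List String) :
    ∀ (st : List String × Bool),
      List.foldl pvSecStep st (pvGroupRec lines) = List.foldl pvStepA st lines := by
  induction lines using pvGroupRec.induct with
  | case1 => intro st; simp [pvGroupRec_nil]
  | case2 l ls ih =>
      intro st
      have htw : ∀ x ∈ ls.takeWhile (fun x => !pvHdr x), pvHdr x = false := by
        intro x hx
        have := List.mem_takeWhile_imp hx
        simpa using this
      have hsplit : (l :: ls.takeWhile (fun x => !pvHdr x)) ++ ls.dropWhile (fun x => !pvHdr x)
          = l :: ls := by
        simp [List.takeWhile_append_dropWhile]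
      rw [pvGroupRec_cons, List.foldl_cons, ih, pvSecStep_eq_fold _ _ _ htw,
        ← List.foldl_append, hsplit]

-- ===== VERDICT (by name: the statement is the Claim_ definition above) =====
theorem filter_safe_sections_py_spec : Claim_equal_filter_safe_sections_py := by
  intro mp _
  show filter_safe_sections_py mp = filter_safe_sections_py_alt mp
  simp only [filter_safe_sections_py, filter_safe_sections_py_alt,
    pvGroup_eq_rec, pvMainFold, pvLoopA_eq_stepA]
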